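-- pv_equiv track=rewrite | github.com/robertvazan/llobot | llobot/utils/text.py | quote_code
-- ===== SOURCE A (Python) =====
-- def quote_code(text: str) -> str:
--     """
--     Quotes text as an inline Markdown code span.
--
--     Surrounds text with backticks, ensuring that the fence is longer than any
--     sequence of backticks in the text. Adds padding spaces if necessary (i.e.
--     if the text begins or ends with a backtick).
--     """
--     if not text:
--         return '``'
--
--     max_backticks = 0
--     current_backticks = 0
--     for char in text:
--         if char == '`':
--             current_backticks += 1
--         else:
--             max_backticks = max(max_backticks, current_backticks)
--             current_backticks = 0
--     max_backticks = max(max_backticks, current_backticks)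
--
--     fence_length = max_backticks + 1
--     fence = '`' * fence_length
--
--     if text.startswith('`') or text.endswith('`'):
--         return f'{fence} {text} {fence}'
--     return f'{fence}{text}{fence}'
-- ===== SOURCE B (Python) =====
-- def quote_code(text: str) -> str:
--     # Fence must be one backtick longer than the longest backtick run in the
--     # text, i.e. the shortest backtick string that does not occur as a substring.
--     n = 1
--     while '`' * n in text:
--         n += 1
--     fence = '`' * n
--     if text.startswith('`') or text.endswith('`'):
--         return f'{fence} {text} {fence}'
--     return f'{fence}{text}{fence}'
-- ===== Notes on version B (the rewrite author's own statement) =====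
-- stated objective: simpler
-- what changed: B drops the redundant empty-string guard and replaces the manual current/max backtick-run counter loop with a search for the shortest backtick string that is not a substring of the text ('`'*n in text probing), which directly yields the fence length.
import Mathlib
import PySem

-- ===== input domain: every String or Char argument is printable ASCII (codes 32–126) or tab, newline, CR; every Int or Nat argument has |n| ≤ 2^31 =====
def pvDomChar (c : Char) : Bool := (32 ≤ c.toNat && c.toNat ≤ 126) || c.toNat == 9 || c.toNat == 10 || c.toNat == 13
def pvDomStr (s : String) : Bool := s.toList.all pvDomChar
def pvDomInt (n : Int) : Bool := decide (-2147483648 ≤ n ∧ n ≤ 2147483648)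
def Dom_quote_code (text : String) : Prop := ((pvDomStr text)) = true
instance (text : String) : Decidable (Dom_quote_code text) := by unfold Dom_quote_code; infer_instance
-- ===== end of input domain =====

-- B drops A's redundant empty-string guard and finds the fence as the shortest
-- backtick string not occurring in the text, instead of A's run-counter loop (objective: simpler).

-- ===== PORT A =====
def quote_code (text : String) : String :=
  if text = "" then "``"
  else
    let p : Int × Int := text.toList.foldl
      (fun (st : Int × Int) c => if c = '`' then (st.1, st.2 + 1) else (max st.1 st.2, (0 : Int)))
      ((0 : Int), (0 : Int))
    let maxBackticks : Int := max p.1 p.2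
    let fenceLength : Int := maxBackticks + 1
    let fence : String := String.ofList (List.replicate fenceLength.toNat '`')
    if PySem.Str.startswith text "`" || PySem.Str.endswith text "`" then
      fence ++ " " ++ text ++ " " ++ fence
    else
      fence ++ text ++ fence

-- ===== PORT B =====
-- while '`' * n in text: n += 1   (fuel only makes the loop total; it is never exhausted)
def quoteCodeFence : Nat → List Char → Int → Int
  | 0, _, n => n
  | fuel + 1, s, n =>
    if PySem.Chars.isIn (List.replicate n.toNat '`') s then quoteCodeFence fuel s (n + 1) else n

def quote_code_alt (text : String) : String :=
  let n : Int := quoteCodeFence (text.toList.length + 1) text.toList 1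
  let fence : String := String.ofList (List.replicate n.toNat '`')
  if PySem.Str.startswith text "`" || PySem.Str.endswith text "`" then
    fence ++ " " ++ text ++ " " ++ fence
  else
    fence ++ text ++ fence

-- ===== PRECONDITION & SPEC =====
def Spec_quote_code (text : String) (out : String) : Prop := out = quote_code_alt text
instance (text : String) (out : String) : Decidable (Spec_quote_code text out) := by unfold Spec_quote_code; infer_instance

-- ===== CLAIM (what is proved, stated in full; the proofs are below) =====
def Claim_equal_quote_code : Prop := ∀ (text : String), Dom_quote_code text → Spec_quote_code text (quote_code text)

-- ===== LEMMAS AND PROOFS =====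

-- runMax s c = the longest backtick run in (replicate c '`' ++ s)
def runMax : List Char → Nat → Nat
  | [], c => c
  | x :: t, c => if x = '`' then runMax t (c + 1) else max c (runMax t 0)

-- length of the leading backtick run
def lead : List Char → Nat
  | [] => 0
  | x :: t => if x = '`' then lead t + 1 else 0

theorem replicate_tick_prefix {n c : Nat} (h : n ≤ c) :
    List.replicate n '`' <+: List.replicate c '`' := by
  refine ⟨List.replicate (c - n) '`', ?_⟩
  rw [← List.replicate_add]
  congr 1
  omega

theorem runMax_le (s : List Char) : ∀ c, runMax s c ≤ c + s.length := by
  induction s with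
  | nil => intro c; simp [runMax]
  | cons x t ih =>
    intro c
    simp only [List.length_cons]
    by_cases hx : x = '`'
    · simp only [runMax]; rw [if_pos hx]; have := ih (c + 1); omega
    · simp only [runMax]; rw [if_neg hx]; have := ih 0; omega

theorem runMax_mono (s : List Char) : ∀ {c c' : Nat}, c ≤ c' → runMax s c ≤ runMax s c' := by
  induction s with
  | nil => intro c c' h; simpa [runMax]
  | cons x t ih =>
    intro c c' h
    by_cases hx : x = '`'
    · simp only [runMax]; rw [if_pos hx, if_pos hx]; exact ih (by omega)
    · simp only [runMax]; rw [if_neg hx, if_neg hx]; omega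

theorem lead_le (s : List Char) : ∀ c, c + lead s ≤ runMax s c := by
  induction s with
  | nil => intro c; simp [lead, runMax]
  | cons x t ih =>
    intro c
    by_cases hx : x = '`'
    · simp only [lead, runMax]; rw [if_pos hx, if_pos hx]; have := ih (c + 1); omega
    · simp only [lead, runMax]; rw [if_neg hx, if_neg hx]; omega

theorem prefix_le_lead : ∀ (n : Nat) (s : List Char), List.replicate n '`' <+: s → n ≤ lead s := by
  intro n
  induction n with
  | zero => intro s _; omega
  | succ k ih =>
    intro s h
    cases s with
    | nil => have := h.length_le; simp at this
    | cons x t =>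
      rw [List.replicate_succ, List.cons_prefix_cons] at h
      have hk := ih t h.2
      simp only [lead]
      rw [if_pos h.1.symm]
      omega

theorem infix_le (s : List Char) : ∀ n, List.replicate n '`' <:+: s → n ≤ runMax s 0 := by
  induction s with
  | nil =>
    intro n h
    have := h.length_le
    simp at this
    simp [this, runMax]
  | cons x t ih =>
    intro n h
    rw [List.infix_cons_iff] at h
    rcases h with h | h
    · have h1 := prefix_le_lead n (x :: t) h
      have h2 := lead_le (x :: t) 0
      omega
    · have h1 := ih n h
      by_cases hx : x = '`'
      · simp only [runMax]; rw [if_pos hx]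
        have := runMax_mono t (c := 0) (c' := 0 + 1) (by omega); omega
      · simp only [runMax]; rw [if_neg hx]; omega

theorem le_infix (s : List Char) :
    ∀ (c n : Nat), n ≤ runMax s c → List.replicate n '`' <:+: (List.replicate c '`' ++ s) := by
  induction s with
  | nil =>
    intro c n h
    simp only [runMax] at h
    simpa using (replicate_tick_prefix h).isInfix
  | cons x t ih =>
    intro c n h
    by_cases hx : x = '`'
    · subst hx
      simp [runMax] at h
      have hi := ih (c + 1) n h
      rwa [List.replicate_succ', List.append_assoc, List.singleton_append] at hi
    · simp only [runMax] at h
      rw [if_neg hx] at h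
      rcases le_max_iff.mp h with h | h
      · exact ((replicate_tick_prefix h).trans (List.prefix_append _ _)).isInfix
      · have hi := ih 0 n h
        simp only [List.replicate_zero, List.nil_append] at hi
        exact hi.trans ((List.suffix_cons x t).isInfix.trans (List.suffix_append _ _).isInfix)

theorem isIn_iff (s : List Char) (k : Nat) :
    PySem.Chars.isIn (List.replicate k '`') s = true ↔ k ≤ runMax s 0 := by
  rw [PySem.Chars.isIn_iff_infix]
  constructor
  · exact infix_le s k
  · intro h
    simpa using le_infix s 0 k h

-- A's fold computes runMax
theorem fold_eq_runMax (s : List Char) : ∀ (m c : Nat),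
    (max (s.foldl (fun (st : Int × Int) ch =>
        if ch = '`' then (st.1, st.2 + 1) else (max st.1 st.2, (0 : Int)))
        ((m : Int), (c : Int))).1
      (s.foldl (fun (st : Int × Int) ch =>
        if ch = '`' then (st.1, st.2 + 1) else (max st.1 st.2, (0 : Int)))
        ((m : Int), (c : Int))).2)
      = ((max m (runMax s c) : Nat) : Int) := by
  induction s with
  | nil => intro m c; simp [runMax]
  | cons x t ih =>
    intro m c
    rw [List.foldl_cons]
    by_cases hx : x = '`'
    · rw [if_pos hx]
      have h1 : ((((m : Int), (c : Int)).1, ((m : Int), (c : Int)).2 + 1) : Int × Int)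
          = ((m : Int), ((c + 1 : Nat) : Int)) := by push_cast; rfl
      rw [h1, ih m (c + 1)]
      simp only [runMax]
      rw [if_pos hx]
    · rw [if_neg hx]
      have h1 : ((max ((m : Int), (c : Int)).1 ((m : Int), (c : Int)).2, (0 : Int)) : Int × Int)
          = (((max m c : Nat) : Int), ((0 : Nat) : Int)) := by push_cast; rfl
      rw [h1, ih (max m c) 0]
      simp only [runMax]
      rw [if_neg hx]
      push_cast
      omega

-- B's loop returns runMax + 1
theorem fence_loop_eq (s : List Char) : ∀ (fuel k : Nat),
    runMax s 0 + 1 ≤ k + fuel → 1 ≤ k →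
    quoteCodeFence fuel s (k : Int) = ((max k (runMax s 0 + 1) : Nat) : Int) := by
  intro fuel
  induction fuel with
  | zero =>
    intro k h h1
    simp only [quoteCodeFence]
    congr 1
    omega
  | succ f ih =>
    intro k h h1
    rw [quoteCodeFence]
    rw [Int.toNat_natCast]
    by_cases hk : k ≤ runMax s 0
    · rw [if_pos (by simp [(isIn_iff s k).mpr hk])]
      have hc : ((k : Int) + 1) = ((k + 1 : Nat) : Int) := by push_cast; rfl
      rw [hc, ih (k + 1) (by omega) (by omega)]
      congr 1
      omega
    · have hf : PySem.Chars.isIn (List.replicate k '`') s = false := by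
        apply Bool.eq_false_iff.mpr
        intro h'
        exact hk ((isIn_iff s k).mp h')
      rw [if_neg (by simp [hf])]
      congr 1
      omega

theorem alt_fence (text : String) :
    quoteCodeFence (text.toList.length + 1) text.toList 1
      = ((runMax text.toList 0 + 1 : Nat) : Int) := by
  have hle := runMax_le text.toList 0
  have h := fence_loop_eq text.toList (text.toList.length + 1) 1 (by omega) (by omega)
  rw [show ((1 : Nat) : Int) = (1 : Int) from rfl] at h
  rw [h]
  congr 1

-- ===== VERDICT (by name: the statement is the Claim_ definition above) =====
theorem quote_code_spec : Claim_equal_quote_code := by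
  unfold Claim_equal_quote_code
  intro text _
  unfold Spec_quote_code quote_code quote_code_alt
  by_cases he : text = ""
  · subst he; decide
  · rw [if_neg he]
    dsimp only
    have hfold := fold_eq_runMax text.toList 0 0
    simp only [Nat.cast_zero] at hfold
    rw [hfold, alt_fence text]
    rw [show ((max 0 (runMax text.toList 0) : Nat) : Int) + 1
        = ((runMax text.toList 0 + 1 : Nat) : Int) by push_cast; omega]
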